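-- pv_equiv track=rewrite | github.com/naomi-afrin/Pac-man | pacman.py | from_zone0
-- ===== SOURCE A (Python) =====
-- def from_zone0(lst, z):
--     p = []
--     if z == 1:
--         for i in lst:
--             p.append([i[1], i[0]])
--     elif z == 2:
--         for i in lst:
--             p.append([-i[1], i[0]])
--     elif z == 3:
--         for i in lst:
--             p.append([-i[0], i[1]])
--     elif z == 4:
--         for i in lst:
--             p.append([-i[0], -i[1]])
--     elif z == 5:
--         for i in lst:
--             p.append([-i[1], -i[0]])
--     elif z == 6:
--         for i in lst:
--             p.append([i[1], -i[0]])
--     else: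
--         for i in lst:
--             p.append([i[0], -i[1]])
--
--     return p
-- ===== SOURCE B (Python) =====
-- def from_zone0(lst, z):
--     # Group decomposition: every zone transform is R^k o M^m, where
--     # R(x, y) = (-y, x) is a 90-degree CCW rotation and M(x, y) = (x, -y) a mirror.
--     if 1 <= z <= 6:
--         k, m = (z + 1) // 2, z % 2
--     else:
--         k, m = 0, 1
--     p = [[i[0], -i[1]] if m else [i[0], i[1]] for i in lst]
--     for _ in range(k):
--         p = [[-y, x] for x, y in p]
--     return p
-- ===== Notes on version B (the rewrite author's own statement) =====
-- stated objective: alternative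
-- what changed: Replaces the 7-way branch of per-zone elementwise transforms with a group-theoretic decomposition: each zone's map is computed as k successive 90-degree rotation passes applied after one optional mirror pass (R^k o M^m), so no zone-specific formula exists anywhere in the code.
import Mathlib
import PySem

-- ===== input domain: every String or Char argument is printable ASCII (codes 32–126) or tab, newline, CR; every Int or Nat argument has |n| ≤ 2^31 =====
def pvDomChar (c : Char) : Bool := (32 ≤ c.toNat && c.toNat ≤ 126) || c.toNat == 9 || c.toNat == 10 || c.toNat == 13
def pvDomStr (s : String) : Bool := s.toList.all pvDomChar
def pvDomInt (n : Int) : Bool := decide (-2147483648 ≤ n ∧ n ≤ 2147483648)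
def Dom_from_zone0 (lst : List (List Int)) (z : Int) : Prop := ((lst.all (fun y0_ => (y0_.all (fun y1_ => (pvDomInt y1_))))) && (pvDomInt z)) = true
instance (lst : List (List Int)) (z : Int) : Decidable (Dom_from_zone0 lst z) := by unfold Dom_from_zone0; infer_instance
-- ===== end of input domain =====

-- B replaces the 7-way branch of per-zone formulas with a group decomposition R^k ∘ M^m
-- (k quarter-turn rotation passes after one optional mirror pass); alternative, same cost.

-- ===== PORT A =====
-- i[k]; in range for every row under Pre_from_zone0 (Python raises IndexError on shorter rows, excluded there)
def pvIdxA (i : List Int) (k : Int) : Int := (PySem.List.pyGet? i k).getD 0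

def from_zone0 (lst : List (List Int)) (z : Int) : List (List Int) :=
  if z = 1 then lst.foldl (fun p i => p ++ [[pvIdxA i 1, pvIdxA i 0]]) []
  else if z = 2 then lst.foldl (fun p i => p ++ [[-(pvIdxA i 1), pvIdxA i 0]]) []
  else if z = 3 then lst.foldl (fun p i => p ++ [[-(pvIdxA i 0), pvIdxA i 1]]) []
  else if z = 4 then lst.foldl (fun p i => p ++ [[-(pvIdxA i 0), -(pvIdxA i 1)]]) []
  else if z = 5 then lst.foldl (fun p i => p ++ [[-(pvIdxA i 1), -(pvIdxA i 0)]]) []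
  else if z = 6 then lst.foldl (fun p i => p ++ [[pvIdxA i 1, -(pvIdxA i 0)]]) []
  else lst.foldl (fun p i => p ++ [[pvIdxA i 0, -(pvIdxA i 1)]]) []

-- ===== PORT B =====
-- i[k]; in range for every row under Pre_from_zone0
def pvIdxB (i : List Int) (k : Int) : Int := (PySem.List.pyGet? i k).getD 0

-- 'p = [[-y, x] for x, y in p]': Python tuple-unpacking of rows; rows fed to it are
-- always the 2-element lists built by the mirror pass, so the catch-all is unreachable.
def pvRotPass (p : List (List Int)) : List (List Int) :=
  p.map (fun r => match r with | [x, y] => [-y, x] | _ => [])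

def from_zone0_alt (lst : List (List Int)) (z : Int) : List (List Int) :=
  let km : Int × Int :=
    if 1 ≤ z ∧ z ≤ 6 then (PySem.Int.floordiv (z + 1) 2, PySem.Int.mod z 2) else (0, 1)
  let p0 := lst.map (fun i =>
    if km.2 ≠ 0 then [pvIdxB i 0, -(pvIdxB i 1)] else [pvIdxB i 0, pvIdxB i 1])
  (PySem.List.pyRange 0 km.1 1).foldl (fun p _ => pvRotPass p) p0

-- ===== PRECONDITION & SPEC =====
-- Pre_ excludes rows with fewer than 2 elements, on which the Python A raises IndexError.
def Pre_from_zone0 (lst : List (List Int)) (z : Int) : Prop := ∀ i ∈ lst, 2 ≤ i.length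
instance (lst : List (List Int)) (z : Int) : Decidable (Pre_from_zone0 lst z) := by unfold Pre_from_zone0; infer_instance
def pvWitness_from_zone0 : List (List Int) × Int := ([[1, 2], [3, -4]], 1)

def Spec_from_zone0 (lst : List (List Int)) (z : Int) (out : List (List Int)) : Prop := out = from_zone0_alt lst z
instance (lst : List (List Int)) (z : Int) (out : List (List Int)) : Decidable (Spec_from_zone0 lst z out) := by unfold Spec_from_zone0; infer_instance

-- ===== CLAIM =====
def Claim_equal_from_zone0 : Prop := ∀ (lst : List (List Int)) (z : Int), Dom_from_zone0 lst z → Pre_from_zone0 lst z → Spec_from_zone0 lst z (from_zone0 lst z)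

-- ===== LEMMAS AND PROOFS =====
theorem pvFlatSingleton {α β : Type} (f : α → β) :
    ∀ (l : List α), (List.map (fun i => [f i]) l).flatten = List.map f l := by
  intro l; induction l with
  | nil => rfl
  | cons h t ih => simp [ih]

-- ===== VERDICT =====
theorem from_zone0_spec : Claim_equal_from_zone0 := by
  intro lst z _ _
  unfold Spec_from_zone0 from_zone0 from_zone0_alt
  by_cases h1 : z = 1
  · subst h1
    have hr : PySem.List.pyRange 0 1 1 = [0] := by decide
    simp [PySem.Int.floordiv, PySem.Int.mod, hr, pvRotPass, List.map_map, pvIdxA, pvIdxB]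
    rw [pvFlatSingleton]
    exact List.map_congr_left fun i _ => by simp [Function.comp]
  by_cases h2 : z = 2
  · subst h2
    have hr : PySem.List.pyRange 0 1 1 = [0] := by decide
    simp [PySem.Int.floordiv, PySem.Int.mod, hr, pvRotPass, List.map_map, pvIdxA, pvIdxB]
    rw [pvFlatSingleton]
    exact List.map_congr_left fun i _ => by simp [Function.comp]
  by_cases h3 : z = 3
  · subst h3
    have hr : PySem.List.pyRange 0 2 1 = [0, 1] := by decide
    simp [PySem.Int.floordiv, PySem.Int.mod, hr, pvRotPass, List.map_map, pvIdxA, pvIdxB]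
    rw [pvFlatSingleton]
    exact List.map_congr_left fun i _ => by simp [Function.comp]
  by_cases h4 : z = 4
  · subst h4
    have hr : PySem.List.pyRange 0 2 1 = [0, 1] := by decide
    simp [PySem.Int.floordiv, PySem.Int.mod, hr, pvRotPass, List.map_map, pvIdxA, pvIdxB]
    rw [pvFlatSingleton]
    exact List.map_congr_left fun i _ => by simp [Function.comp]
  by_cases h5 : z = 5
  · subst h5
    have hr : PySem.List.pyRange 0 3 1 = [0, 1, 2] := by decide
    simp [PySem.Int.floordiv, PySem.Int.mod, hr, pvRotPass, List.map_map, pvIdxA, pvIdxB]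
    rw [pvFlatSingleton]
    exact List.map_congr_left fun i _ => by simp [Function.comp]
  by_cases h6 : z = 6
  · subst h6
    have hr : PySem.List.pyRange 0 3 1 = [0, 1, 2] := by decide
    simp [PySem.Int.floordiv, PySem.Int.mod, hr, pvRotPass, List.map_map, pvIdxA, pvIdxB]
    rw [pvFlatSingleton]
    exact List.map_congr_left fun i _ => by simp [Function.comp]
  · have hz : ¬ (1 ≤ z ∧ z ≤ 6) := by omega
    have hr : PySem.List.pyRange 0 0 1 = [] := by decide
    simp [h1, h2, h3, h4, h5, h6, hz, hr, pvIdxA, pvIdxB]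
    rw [pvFlatSingleton]
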